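-- pv_equiv track=rewrite | github.com/minghu6/leet-code | 1871_jump_games_7/py1871/stack.py | solve
-- ===== SOURCE A (Python) =====
-- from collections import deque
-- from itertools import islice
--
-- def solve(s: str, minJump: int, maxJump: int) -> bool:
--     n = len(s)
--     stack = deque([0])
--
--     for i, v in islice(enumerate(s), 1, None):
--         if v == '0':
--             while stack and stack[0] < i-maxJump:
--                 stack.popleft()
--
--             if not stack:
--                 return False
--
--             if stack[0] <= i-minJump:
--                 stack.append(i)
--
--     return bool(stack) and stack[-1] == n-1
-- ===== SOURCE B (Python) =====
-- def solve(s: str, minJump: int, maxJump: int) -> bool: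
--     n = len(s)
--     if n == 0:
--         return False
--     dp = [False] * n          # dp[i]: index i reachable (index 0 always is)
--     dp[0] = True
--     pre = [0] * n             # pre[i]: number of reachable indices among 0..i
--     pre[0] = 1
--     for i in range(1, n):
--         if s[i] == '0':
--             lo = max(0, i - maxJump)
--             hi = min(i - 1, i - minJump)
--             if lo <= hi and pre[hi] - (pre[lo - 1] if lo > 0 else 0) > 0:
--                 dp[i] = True
--         pre[i] = pre[i - 1] + (1 if dp[i] else 0)
--     return dp[n - 1]
-- ===== Notes on version B (the rewrite author's own statement) =====
-- stated objective: alternative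
-- what changed: Replaces A's lazily-popped deque of reachable indices (with early return False when it empties) by a dp boolean array plus a prefix-sum array of reachable counts, answering each window query [max(0,i-maxJump), min(i-1,i-minJump)] by a prefix-sum difference.
import Mathlib
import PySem

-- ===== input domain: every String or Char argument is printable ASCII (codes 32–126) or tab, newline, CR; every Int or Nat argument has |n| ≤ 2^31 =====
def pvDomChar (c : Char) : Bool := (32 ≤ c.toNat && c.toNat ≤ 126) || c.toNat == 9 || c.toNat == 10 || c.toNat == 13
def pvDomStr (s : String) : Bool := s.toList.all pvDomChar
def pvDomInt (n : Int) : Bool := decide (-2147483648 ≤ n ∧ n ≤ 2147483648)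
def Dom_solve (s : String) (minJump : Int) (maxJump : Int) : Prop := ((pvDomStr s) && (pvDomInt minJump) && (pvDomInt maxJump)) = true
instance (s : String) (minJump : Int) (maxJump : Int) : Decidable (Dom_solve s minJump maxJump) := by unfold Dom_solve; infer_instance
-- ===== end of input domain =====

-- Jump Game VII: B replaces A's lazily-popped deque of reachable indices by a dp + prefix-sum
-- table queried over the clamped window [max 0 (i-maxJump), min (i-1) (i-minJump)] (objective: alternative).

-- ===== PORT A =====
-- the inner `while stack and stack[0] < i-maxJump: stack.popleft()`
def popA (thr : Int) : List Int → List Int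
  | [] => []
  | x :: xs => if x < thr then popA thr xs else x :: xs

-- the `for i, v in islice(enumerate(s), 1, None)` loop; `none` = the early `return False`
def aLoop (mj Mj : Int) : List (Int × Char) → List Int → Option (List Int)
  | [], st => some st
  | (i, v) :: rest, st =>
    if v == '0' then
      match popA (i - Mj) st with
      | [] => none
      | top :: st' =>
        aLoop mj Mj rest (if top ≤ i - mj then (top :: st') ++ [i] else top :: st')
    else aLoop mj Mj rest st

-- the function result from the loop outcome: `none` = the early `return False`,
-- otherwise the final `return bool(stack) and stack[-1] == n-1`
def aFin (n : Int) : Option (List Int) → Bool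
  | none => false
  | some st => !st.isEmpty && (st.getLast? == some (n - 1))

def solve (s : String) (minJump : Int) (maxJump : Int) : Bool :=
  let c := s.toList
  let n := c.length
  aFin (n : Int) (aLoop minJump maxJump ((PySem.List.enumerate c 0).drop 1) [0])

-- ===== PORT B =====
-- the window test `lo <= hi and pre[hi] - (pre[lo-1] if lo > 0 else 0) > 0` of Source B;
-- all indices read are in range whenever Source B reads them, so plain `getD` is exact here
def bCond (mj Mj : Int) (pre : List Int) (i : Nat) : Bool :=
  let lo : Int := max 0 ((i : Int) - Mj)
  let hi : Int := min ((i : Int) - 1) ((i : Int) - mj)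
  decide (lo ≤ hi) &&
    decide (0 < pre.getD hi.toNat 0 - (if 0 < lo then pre.getD (lo - 1).toNat 0 else 0))

-- dp after the `if s[i] == '0': … dp[i] = True` part of one iteration of Source B's loop
def bDp (c : List Char) (mj Mj : Int) (st : List Bool × List Int) (i : Nat) : List Bool :=
  if c.getD i ' ' == '0' then
    (if bCond mj Mj st.2 i then st.1.set i true else st.1)
  else st.1

-- one full iteration of Source B's `for i in range(1, n)` loop on the state (dp, pre)
def bStep (c : List Char) (mj Mj : Int) (st : List Bool × List Int) (i : Nat) : List Bool × List Int :=
  (bDp c mj Mj st i,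
   st.2.set i (st.2.getD (i - 1) 0 + (if (bDp c mj Mj st i).getD i false then 1 else 0)))

def solve_alt (s : String) (minJump : Int) (maxJump : Int) : Bool :=
  let c := s.toList
  let n := c.length
  if n = 0 then false
  else
    -- List.range' 1 (n-1) = [1, …, n-1] = Python's range(1, n)
    (((List.range' 1 (n - 1)).foldl (bStep c minJump maxJump)
        ((List.replicate n false).set 0 true, (List.replicate n (0 : Int)).set 0 1)).1).getD
      (n - 1) false

-- ===== PRECONDITION & SPEC =====
def Spec_solve (s : String) (minJump : Int) (maxJump : Int) (out : Bool) : Prop := out = solve_alt s minJump maxJump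
instance (s : String) (minJump : Int) (maxJump : Int) (out : Bool) : Decidable (Spec_solve s minJump maxJump out) := by unfold Spec_solve; infer_instance

-- ===== CLAIM (what is proved, stated in full; the proofs are below) =====
def Claim_equal_solve : Prop := ∀ (s : String) (minJump : Int) (maxJump : Int), Dom_solve s minJump maxJump → Spec_solve s minJump maxJump (solve s minJump maxJump)

-- ===== LEMMAS AND PROOFS =====

-- reachability spec: index 0 is reachable; i+1 is reachable iff s[i+1]='0' and some reachable
-- j < i+1 lies in the jump window [i+1-maxJump, i+1-minJump]
def reach (c : List Char) (mj Mj : Int) : Nat → Bool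
  | 0 => true
  | i + 1 =>
    (c.getD (i + 1) ' ' == '0') &&
    ((List.range (i + 1)).attach.any fun j =>
      reach c mj Mj j.1 && decide (((i : Int) + 1) - Mj ≤ (j.1 : Int)) &&
        decide ((j.1 : Int) ≤ ((i : Int) + 1) - mj))
decreasing_by exact List.mem_range.mp j.2

lemma reach_zero (c : List Char) (mj Mj : Int) : reach c mj Mj 0 = true := by rw [reach]

lemma reach_succ (c : List Char) (mj Mj : Int) (i : Nat) :
    reach c mj Mj (i + 1) = true ↔
      (c.getD (i + 1) ' ' = '0' ∧
        ∃ j : Nat, j < i + 1 ∧ ((i : Int) + 1) - Mj ≤ (j : Int) ∧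
          (j : Int) ≤ ((i : Int) + 1) - mj ∧ reach c mj Mj j = true) := by
  rw [reach]
  simp only [Bool.and_eq_true, beq_iff_eq, List.any_eq_true, List.mem_attach, true_and,
    decide_eq_true_eq, Subtype.exists, List.mem_range]
  constructor
  · rintro ⟨h0, j, hj, ⟨⟨hr, h1⟩, h2⟩⟩
    exact ⟨h0, j, hj, h1, h2, hr⟩
  · rintro ⟨h0, j, hj, h1, h2, hr⟩
    exact ⟨h0, j, hj, ⟨⟨hr, h1⟩, h2⟩⟩

lemma reach_succ_false (c : List Char) (mj Mj : Int) (i : Nat)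
    (h : c.getD (i + 1) ' ' ≠ '0') : reach c mj Mj (i + 1) = false := by
  rw [← Bool.not_eq_true, reach_succ]
  rintro ⟨h0, -⟩
  exact h h0

-- no index ≥ i is reachable once no reachable index lies in [i-maxJump, i-1] with 1 ≤ i-maxJump
lemma reach_dead (c : List Char) (mj Mj : Int) (i : Nat) (hi : 1 ≤ i)
    (h2 : ∀ j : Nat, j < i → (i : Int) - Mj ≤ (j : Int) → reach c mj Mj j = false) :
    ∀ m : Nat, i ≤ m → reach c mj Mj m = false := by
  intro m
  induction m using Nat.strong_induction_on with
  | _ m ih =>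
    intro him
    match m, him with
    | 0, him => omega
    | t + 1, him =>
      rw [← Bool.not_eq_true, reach_succ]
      rintro ⟨h0, j, hj, hw1, hw2, hr⟩
      have hcast : (i : Int) ≤ (t : Int) + 1 := by exact_mod_cast him
      by_cases hji : j < i
      · have := h2 j hji (by omega)
        rw [this] at hr; exact Bool.false_ne_true hr
      · have := ih j hj (by omega)
        rw [this] at hr; exact Bool.false_ne_true hr

-- count of reachable indices among 0..j (the value Source B keeps in pre[j])
def cntR (c : List Char) (mj Mj : Int) (j : Nat) : Int :=
  (((List.range (j + 1)).filter (fun t => reach c mj Mj t)).length : Int)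

-- A's stack contents after processing index k, when all pops so far had thresholds ≤ θ
def stkS (c : List Char) (mj Mj : Int) (θ : Int) (k : Nat) : List Int :=
  ((List.range (k + 1)).filter (fun j => reach c mj Mj j && decide (θ ≤ (j : Int)))).map
    (fun (j : Nat) => (j : Int))

lemma mem_stkS (c : List Char) (mj Mj θ : Int) (k : Nat) (y : Int) :
    y ∈ stkS c mj Mj θ k ↔
      ∃ j : Nat, j ≤ k ∧ reach c mj Mj j = true ∧ θ ≤ (j : Int) ∧ y = (j : Int) := by
  simp only [stkS, List.mem_map, List.mem_filter, List.mem_range, Nat.lt_succ_iff,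
    Bool.and_eq_true, decide_eq_true_eq]
  constructor
  · rintro ⟨j, ⟨⟨hjk, hr, hθ⟩, rfl⟩⟩
    exact ⟨j, hjk, hr, hθ, rfl⟩
  · rintro ⟨j, hjk, hr, hθ, rfl⟩
    exact ⟨j, ⟨⟨hjk, hr, hθ⟩, rfl⟩⟩

lemma stkS_sorted (c : List Char) (mj Mj θ : Int) (k : Nat) :
    (stkS c mj Mj θ k).Pairwise (· < ·) := by
  exact ((List.pairwise_lt_range).filter _).map _ (fun a b h => by exact_mod_cast h)

lemma stkS_sorted_le (c : List Char) (mj Mj θ : Int) (k : Nat) :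
    (stkS c mj Mj θ k).Pairwise (· ≤ ·) :=
  (stkS_sorted c mj Mj θ k).imp le_of_lt

lemma popA_eq_filter (t : Int) (l : List Int) (h : l.Pairwise (· ≤ ·)) :
    popA t l = l.filter (fun x => decide (t ≤ x)) := by
  induction l with
  | nil => rfl
  | cons x xs ih =>
    rw [List.pairwise_cons] at h
    by_cases hx : x < t
    · rw [popA, if_pos hx, ih h.2, List.filter_cons_of_neg (by simp; omega)]
    · rw [popA, if_neg hx, List.filter_cons_of_pos (by simp; omega)]
      congr 1
      exact (List.filter_eq_self.mpr (fun y hy => by simp; have := h.1 y hy; omega)).symm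

lemma popA_stkS (c : List Char) (mj Mj θ t : Int) (k : Nat) (h : θ ≤ t) :
    popA t (stkS c mj Mj θ k) = stkS c mj Mj t k := by
  rw [popA_eq_filter t _ (stkS_sorted_le c mj Mj θ k)]
  unfold stkS
  rw [List.filter_map]
  congr 1
  rw [List.filter_filter]
  apply List.filter_congr
  intro j _
  by_cases hj : t ≤ (j : Int)
  · simp [Function.comp, hj, le_trans h hj]
  · simp [Function.comp, hj]

lemma stkS_succ_false (c : List Char) (mj Mj θ : Int) (k : Nat)
    (h : reach c mj Mj (k + 1) = false) : stkS c mj Mj θ (k + 1) = stkS c mj Mj θ k := by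
  unfold stkS
  rw [List.range_succ, List.filter_append, List.map_append]
  simp [h]

lemma stkS_succ_true (c : List Char) (mj Mj θ : Int) (k : Nat)
    (h : reach c mj Mj (k + 1) = true) (hθ : θ ≤ ((k + 1 : Nat) : Int)) :
    stkS c mj Mj θ (k + 1) = stkS c mj Mj θ k ++ [((k + 1 : Nat) : Int)] := by
  unfold stkS
  rw [List.range_succ, List.filter_append, List.map_append]
  congr 1
  rw [List.filter_cons_of_pos (by simp [h]; omega), List.filter_nil]
  simp

lemma head_min (x a : Int) (l : List Int) (h : (x :: l).Pairwise (· ≤ ·)) :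
    (∃ y ∈ x :: l, y ≤ a) ↔ x ≤ a := by
  rw [List.pairwise_cons] at h
  constructor
  · rintro ⟨y, hy, hya⟩
    rcases List.mem_cons.mp hy with rfl | hy'
    · exact hya
    · exact le_trans (h.1 y hy') hya
  · intro hx
    exact ⟨x, List.mem_cons_self, hx⟩

lemma final_eval (c : List Char) (mj Mj θ : Int) (k : Nat) (hθ : θ ≤ (k : Int)) :
    (!(stkS c mj Mj θ k).isEmpty && ((stkS c mj Mj θ k).getLast? == some ((k : Nat) : Int)))
      = reach c mj Mj k := by
  cases hr : reach c mj Mj k with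
  | true =>
    have hst : stkS c mj Mj θ k =
        ((List.range k).filter (fun j => reach c mj Mj j && decide (θ ≤ (j : Int)))).map
          (fun (j : Nat) => (j : Int)) ++ [((k : Nat) : Int)] := by
      unfold stkS
      rw [List.range_succ, List.filter_append, List.map_append]
      simp [hr, hθ]
    rw [hst]
    simp
  | false =>
    rcases hL : (stkS c mj Mj θ k).getLast? with _ | y
    · simp
    · have hy : y ∈ stkS c mj Mj θ k := List.mem_of_getLast? hL
      obtain ⟨j, hjk, hjr, -, rfl⟩ := (mem_stkS c mj Mj θ k y).mp hy
      have hjne : j ≠ k := by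
        rintro rfl
        rw [hjr] at hr
        cases hr
      simp [hjne]

-- ===== A-side main loop invariant =====
lemma aMain (c : List Char) (mj Mj : Int) :
    ∀ (t : List Char) (m : Nat) (θ : Int),
      c.drop (m + 1) = t → m + 1 ≤ c.length → θ ≤ (m : Int) + 1 - Mj → θ ≤ (m : Int) →
      aFin (c.length : Int)
          (aLoop mj Mj (PySem.List.enumerate t ((m : Int) + 1)) (stkS c mj Mj θ m))
        = reach c mj Mj (c.length - 1) := by
  intro t
  induction t with
  | nil =>
    intro m θ hdrop hlen hθ1 hθ2
    have hm : m + 1 = c.length := by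
      have := congrArg List.length hdrop
      simp [List.length_drop] at this
      omega
    rw [PySem.List.enumerate_nil, aLoop, aFin]
    have h2 : c.length - 1 = m := by omega
    have h3 : ((c.length : Int) - 1) = ((m : Nat) : Int) := by omega
    rw [h2, h3]
    exact final_eval c mj Mj θ m hθ2
  | cons v t' ih =>
    intro m θ hdrop hlen hθ1 hθ2
    have hmlt : m + 1 < c.length := by
      have := congrArg List.length hdrop
      simp [List.length_drop] at this
      omega
    have hgetD : c.getD (m + 1) ' ' = v := by
      have h0 : (c.drop (m + 1)).getD 0 ' ' = v := by rw [hdrop]; rfl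
      rw [List.getD_eq_getElem?_getD, List.getElem?_drop] at h0
      rw [List.getD_eq_getElem?_getD]
      simpa using h0
    have hdrop' : c.drop (m + 1 + 1) = t' := by
      have h0 : (c.drop (m + 1)).drop 1 = t' := by rw [hdrop]; rfl
      rw [List.drop_drop] at h0
      exact h0
    have hcast : ((m : Int) + 1) + 1 = ((m + 1 : Nat) : Int) + 1 := by push_cast; ring
    rw [PySem.List.enumerate_cons, aLoop]
    by_cases hv : v = '0'
    · subst hv
      rw [if_pos (show ('0' == '0') = true from rfl)]
      have hpop : popA ((m : Int) + 1 - Mj) (stkS c mj Mj θ m)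
          = stkS c mj Mj ((m : Int) + 1 - Mj) m := popA_stkS c mj Mj θ _ m (by omega)
      rw [hpop]
      cases h0 : stkS c mj Mj ((m : Int) + 1 - Mj) m with
      | nil =>
        -- early `return False`: nothing reachable remains in any later window
        have h2 : ∀ j : Nat, j < m + 1 → ((m + 1 : Nat) : Int) - Mj ≤ (j : Int) →
            reach c mj Mj j = false := by
          intro j hj hjt
          by_contra hcon
          rw [Bool.not_eq_false] at hcon
          have : ((j : Nat) : Int) ∈ stkS c mj Mj ((m : Int) + 1 - Mj) m :=
            (mem_stkS _ _ _ _ _ _).mpr ⟨j, by omega, hcon, by push_cast at hjt ⊢; omega, rfl⟩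
          rw [h0] at this
          exact absurd this (List.not_mem_nil)
        have hdead := reach_dead c mj Mj (m + 1) (by omega) h2
        rw [aFin]
        exact (hdead (c.length - 1) (by omega)).symm
      | cons x st' =>
        have hxmem : x ∈ stkS c mj Mj ((m : Int) + 1 - Mj) m := by
          rw [h0]; exact List.mem_cons_self
        obtain ⟨jx, hjx_le, hjx_r, hjx_t, rfl⟩ := (mem_stkS _ _ _ _ _ _).mp hxmem
        have hjx_le' : ((jx : Nat) : Int) ≤ (m : Int) := by exact_mod_cast hjx_le
        change aFin ((c.length : Int))
            (aLoop mj Mj (PySem.List.enumerate t' ((m : Int) + 1 + 1))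
              (if ((jx : Nat) : Int) ≤ (m : Int) + 1 - mj
                then (((jx : Nat) : Int) :: st') ++ [(m : Int) + 1]
                else ((jx : Nat) : Int) :: st')) = reach c mj Mj (c.length - 1)
        -- front ≤ i - minJump  ⟺  index m+1 is reachable
        have hC : (((jx : Nat) : Int) ≤ (m : Int) + 1 - mj) ↔ reach c mj Mj (m + 1) = true := by
          constructor
          · intro hle
            rw [reach_succ]
            exact ⟨hgetD, jx, by omega, by push_cast; omega, by push_cast; omega, hjx_r⟩
          · intro hre
            obtain ⟨-, j, hj, hw1, hw2, hr⟩ := (reach_succ c mj Mj m).mp hre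
            have hjmem : ((j : Nat) : Int) ∈ stkS c mj Mj ((m : Int) + 1 - Mj) m :=
              (mem_stkS _ _ _ _ _ _).mpr ⟨j, by omega, hr, by push_cast at hw1 ⊢; omega, rfl⟩
            rw [h0] at hjmem
            have hsorted : ((jx : Int) :: st').Pairwise (· ≤ ·) := by
              rw [← h0]; exact stkS_sorted_le c mj Mj _ m
            exact (head_min _ _ _ hsorted).mp ⟨(j : Int), hjmem, by push_cast at hw2 ⊢; omega⟩
        by_cases hcond : ((jx : Nat) : Int) ≤ (m : Int) + 1 - mj
        · rw [if_pos hcond]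
          have hre : reach c mj Mj (m + 1) = true := hC.mp hcond
          have hnew : ((jx : Int) :: st') ++ [(m : Int) + 1]
              = stkS c mj Mj ((m : Int) + 1 - Mj) (m + 1) := by
            rw [stkS_succ_true c mj Mj _ m hre (by push_cast; omega), ← h0]
            congr 1
          rw [hnew, hcast]
          exact ih (m + 1) ((m : Int) + 1 - Mj) hdrop' (by omega) (by push_cast; omega)
            (by push_cast; omega)
        · rw [if_neg hcond]
          have hre : reach c mj Mj (m + 1) = false := by
            cases hre' : reach c mj Mj (m + 1) with
            | false => rfl
            | true => exact absurd (hC.mpr hre') hcond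
          have hnew : ((jx : Int) :: st') = stkS c mj Mj ((m : Int) + 1 - Mj) (m + 1) := by
            rw [stkS_succ_false c mj Mj _ m hre, ← h0]
          rw [hnew, hcast]
          exact ih (m + 1) ((m : Int) + 1 - Mj) hdrop' (by omega) (by push_cast; omega)
            (by push_cast; omega)
    · rw [if_neg (by simpa using hv)]
      have hre : reach c mj Mj (m + 1) = false := reach_succ_false c mj Mj m (by rw [hgetD]; exact hv)
      rw [show stkS c mj Mj θ m = stkS c mj Mj θ (m + 1) from (stkS_succ_false c mj Mj θ m hre).symm,
        hcast]
      exact ih (m + 1) θ hdrop' (by omega) (by push_cast; omega) (by push_cast; omega)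

-- ===== B-side loop invariant =====
-- the dp and pre lists after processing indices 1..k
def dpS (c : List Char) (mj Mj : Int) (n k : Nat) : List Bool :=
  (List.range n).map (fun j => decide (j ≤ k) && reach c mj Mj j)

def preS (c : List Char) (mj Mj : Int) (n k : Nat) : List Int :=
  (List.range n).map (fun j => if j ≤ k then cntR c mj Mj j else 0)

lemma getD_map_range' {α : Type} (n i : Nat) (f : Nat → α) (d : α) (h : i < n) :
    ((List.range n).map f).getD i d = f i := by
  rw [List.getD_eq_getElem?_getD]
  simp [h]

lemma set_map_range {α : Type} (n i : Nat) (f : Nat → α) (v : α) (_h : i < n) :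
    ((List.range n).map f).set i v = (List.range n).map (fun j => if j = i then v else f j) := by
  apply List.ext_getElem
  · simp
  · intro j hj1 hj2
    simp only [List.getElem_set, List.getElem_map, List.getElem_range]
    simp only [List.length_set, List.length_map, List.length_range] at hj1
    by_cases hij : i = j
    · subst hij; simp
    · simp [hij, Ne.symm hij]

lemma cntR_zero (c : List Char) (mj Mj : Int) : cntR c mj Mj 0 = 1 := by
  simp [cntR, List.range_succ, reach_zero]

lemma cntR_succ (c : List Char) (mj Mj : Int) (k : Nat) :
    cntR c mj Mj (k + 1) = cntR c mj Mj k + (if reach c mj Mj (k + 1) = true then 1 else 0) := by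
  unfold cntR
  rw [List.range_succ, List.filter_append]
  cases hr : reach c mj Mj (k + 1) <;> simp [hr]

lemma cnt_window (c : List Char) (mj Mj : Int) (a b : Nat) (hab : a ≤ b) :
    (0 < cntR c mj Mj b - (if 0 < a then cntR c mj Mj (a - 1) else 0)) ↔
      ∃ j : Nat, a ≤ j ∧ j ≤ b ∧ reach c mj Mj j = true := by
  have hsplit : List.range (b + 1) = List.range' 0 a ++ List.range' a (b + 1 - a) := by
    rw [List.range_eq_range']
    have h := List.range'_append (s := 0) (m := a) (n := b + 1 - a) (step := 1)
    simp only [Nat.zero_add, one_mul] at h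
    rw [show a + (b + 1 - a) = b + 1 by omega] at h
    exact h.symm
  have hcnt : cntR c mj Mj b =
      (((List.range' 0 a).filter (fun t => reach c mj Mj t)).length : Int) +
      (((List.range' a (b + 1 - a)).filter (fun t => reach c mj Mj t)).length : Int) := by
    unfold cntR
    rw [hsplit, List.filter_append, List.length_append]
    push_cast
    ring
  have hpre : (if 0 < a then cntR c mj Mj (a - 1) else 0) =
      (((List.range' 0 a).filter (fun t => reach c mj Mj t)).length : Int) := by
    by_cases ha : 0 < a
    · rw [if_pos ha]
      unfold cntR
      rw [show a - 1 + 1 = a by omega, List.range_eq_range']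
    · rw [if_neg ha]
      have : a = 0 := by omega
      subst this
      simp
  rw [hcnt, hpre]
  rw [show (((List.range' 0 a).filter (fun t => reach c mj Mj t)).length : Int) +
      (((List.range' a (b + 1 - a)).filter (fun t => reach c mj Mj t)).length : Int) -
      (((List.range' 0 a).filter (fun t => reach c mj Mj t)).length : Int) =
      (((List.range' a (b + 1 - a)).filter (fun t => reach c mj Mj t)).length : Int) by ring]
  rw [show (0 : Int) < (((List.range' a (b + 1 - a)).filter (fun t => reach c mj Mj t)).length : Int) ↔
      0 < ((List.range' a (b + 1 - a)).filter (fun t => reach c mj Mj t)).length by exact_mod_cast Iff.rfl]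
  rw [← List.countP_eq_length_filter, List.countP_pos_iff]
  constructor
  · rintro ⟨j, hj, hjr⟩
    rw [List.mem_range'_1] at hj
    exact ⟨j, hj.1, by omega, hjr⟩
  · rintro ⟨j, hj1, hj2, hjr⟩
    exact ⟨j, List.mem_range'_1.mpr ⟨hj1, by omega⟩, hjr⟩

lemma bCond_eq_reach (c : List Char) (mj Mj : Int) (n k : Nat) (hk : k + 1 < n)
    (hch : c.getD (k + 1) ' ' = '0') :
    bCond mj Mj (preS c mj Mj n k) (k + 1) = reach c mj Mj (k + 1) := by
  simp only [bCond]
  set I : Int := ((k + 1 : Nat) : Int) with hI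
  have hIval : I = (k : Int) + 1 := by rw [hI]; push_cast; ring
  set lo : Int := max 0 (I - Mj) with hlo
  set hi : Int := min (I - 1) (I - mj) with hhi
  by_cases hlh : lo ≤ hi
  · have hlo0 : 0 ≤ lo := le_max_left _ _
    have hhi0 : 0 ≤ hi := le_trans hlo0 hlh
    have hhik : hi ≤ (k : Int) := by rw [hhi]; have := min_le_left (I - 1) (I - mj); omega
    have hhiN : hi.toNat < n := by omega
    have hhiK : hi.toNat ≤ k := by omega
    have hgd1 : (preS c mj Mj n k).getD hi.toNat 0 = cntR c mj Mj hi.toNat := by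
      unfold preS
      rw [getD_map_range' n hi.toNat _ 0 hhiN, if_pos hhiK]
    rw [hgd1]
    have hgd2 : (if 0 < lo then (preS c mj Mj n k).getD (lo - 1).toNat 0 else 0)
        = (if 0 < lo.toNat then cntR c mj Mj (lo.toNat - 1) else 0) := by
      by_cases hl0 : 0 < lo
      · rw [if_pos hl0, if_pos (by omega)]
        have hlk : (lo - 1).toNat ≤ k := by omega
        unfold preS
        rw [getD_map_range' n (lo - 1).toNat _ 0 (by omega), if_pos hlk]
        congr 1
        omega
      · rw [if_neg hl0, if_neg (by omega)]
    rw [hgd2]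
    have hab : lo.toNat ≤ hi.toNat := by omega
    have hwin := cnt_window c mj Mj lo.toNat hi.toNat hab
    cases hr : reach c mj Mj (k + 1) with
    | true =>
      obtain ⟨-, j, hj, hw1, hw2, hjr⟩ := (reach_succ c mj Mj k).mp hr
      have hjlo : lo.toNat ≤ j := by
        have : lo ≤ (j : Int) := by
          rw [hlo, hIval]; apply max_le (by omega) (by omega)
        omega
      have hjhi : j ≤ hi.toNat := by
        have : (j : Int) ≤ hi := by
          rw [hhi, hIval]; apply le_min (by omega) (by omega)
        omega
      simp only [hlh, decide_true, Bool.true_and]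
      exact decide_eq_true (hwin.mpr ⟨j, hjlo, hjhi, hjr⟩)
    | false =>
      simp only [hlh, decide_true, Bool.true_and]
      apply decide_eq_false
      intro hpos
      obtain ⟨j, hjlo, hjhi, hjr⟩ := hwin.mp hpos
      have : reach c mj Mj (k + 1) = true := by
        rw [reach_succ]
        refine ⟨hch, j, ?_, ?_, ?_, hjr⟩
        · have : (j : Int) ≤ hi := by omega
          rw [hhi, hIval] at this
          have := le_trans this (min_le_left _ _)
          omega
        · have : lo ≤ (j : Int) := by omega
          rw [hlo, hIval] at this
          have := le_trans (le_max_right 0 (I - Mj)) this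
          rw [hIval] at this
          omega
        · have : (j : Int) ≤ hi := by omega
          rw [hhi, hIval] at this
          have := le_trans this (min_le_right _ _)
          omega
      rw [this] at hr
      simp at hr
  · simp only [hlh, decide_false, Bool.false_and]
    symm
    rw [← Bool.not_eq_true, reach_succ]
    rintro ⟨-, j, hj, hw1, hw2, hjr⟩
    apply hlh
    have h1 : lo ≤ (j : Int) := by rw [hlo, hIval]; apply max_le (by omega) (by omega)
    have h2 : (j : Int) ≤ hi := by rw [hhi, hIval]; apply le_min (by omega) (by omega)
    omega

lemma bMain (c : List Char) (mj Mj : Int) (hn : 1 ≤ c.length) :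
    ∀ k, k ≤ c.length - 1 →
      (List.range' 1 k).foldl (bStep c mj Mj)
          ((List.replicate c.length false).set 0 true,
           (List.replicate c.length (0 : Int)).set 0 1)
        = (dpS c mj Mj c.length k, preS c mj Mj c.length k) := by
  intro k
  induction k with
  | zero =>
    intro _
    simp only [List.range'_zero, List.foldl_nil]
    rw [Prod.mk.injEq]
    refine ⟨?_, ?_⟩
    · rw [show (List.replicate c.length false) = (List.range c.length).map (fun _ => false) by
        simp [List.map_const'],
        set_map_range c.length 0 _ true (by omega)]
      unfold dpS
      apply List.map_congr_left
      intro j hj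
      by_cases hj0 : j = 0
      · subst hj0; simp [reach_zero]
      · simp [hj0]
    · rw [show (List.replicate c.length (0 : Int)) = (List.range c.length).map (fun _ => (0 : Int)) by
        simp [List.map_const'],
        set_map_range c.length 0 _ 1 (by omega)]
      unfold preS
      apply List.map_congr_left
      intro j hj
      by_cases hj0 : j = 0
      · subst hj0; simp [cntR_zero]
      · simp [hj0]
  | succ k ih =>
    intro hk
    rw [List.range'_1_concat, List.foldl_append, ih (by omega), List.foldl_cons, List.foldl_nil,
      Nat.add_comm 1 k]
    have hkn : k + 1 < c.length := by omega
    have hdp : bDp c mj Mj (dpS c mj Mj c.length k, preS c mj Mj c.length k) (k + 1)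
        = dpS c mj Mj c.length (k + 1) := by
      unfold bDp
      by_cases hch : c.getD (k + 1) ' ' = '0'
      · rw [if_pos (by simpa using hch)]
        rw [show (dpS c mj Mj c.length k, preS c mj Mj c.length k).2 = preS c mj Mj c.length k from rfl,
          bCond_eq_reach c mj Mj c.length k hkn hch]
        cases hr : reach c mj Mj (k + 1) with
        | true =>
          rw [if_pos rfl]
          unfold dpS
          rw [set_map_range c.length (k + 1) _ true hkn]
          apply List.map_congr_left
          intro j hj
          by_cases hjk : j = k + 1
          · subst hjk; simp [hr]
          · simp only [if_neg hjk]
            congr 1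
            simp only [decide_eq_decide]
            omega
        | false =>
          rw [if_neg (by simp)]
          unfold dpS
          apply List.map_congr_left
          intro j hj
          by_cases hjk : j = k + 1
          · subst hjk; simp [hr]
          · congr 1
            simp only [decide_eq_decide]
            omega
      · rw [if_neg (by simpa using hch)]
        have hr : reach c mj Mj (k + 1) = false := reach_succ_false c mj Mj k hch
        unfold dpS
        apply List.map_congr_left
        intro j hj
        by_cases hjk : j = k + 1
        · subst hjk; simp [hr]
        · congr 1
          simp only [decide_eq_decide]
          omega
    rw [show bStep c mj Mj (dpS c mj Mj c.length k, preS c mj Mj c.length k) (k + 1)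
        = (bDp c mj Mj (dpS c mj Mj c.length k, preS c mj Mj c.length k) (k + 1),
           (preS c mj Mj c.length k).set (k + 1)
             ((preS c mj Mj c.length k).getD (k + 1 - 1) 0 +
              (if (bDp c mj Mj (dpS c mj Mj c.length k, preS c mj Mj c.length k) (k + 1)).getD
                  (k + 1) false then 1 else 0))) from rfl]
    rw [hdp]
    congr 1
    have hgdp : (dpS c mj Mj c.length (k + 1)).getD (k + 1) false = reach c mj Mj (k + 1) := by
      unfold dpS
      rw [getD_map_range' c.length (k + 1) _ false hkn]
      simp
    have hgpre : (preS c mj Mj c.length k).getD (k + 1 - 1) 0 = cntR c mj Mj k := by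
      unfold preS
      rw [show k + 1 - 1 = k from rfl, getD_map_range' c.length k _ 0 (by omega), if_pos le_rfl]
    rw [hgdp, hgpre]
    unfold preS
    rw [set_map_range c.length (k + 1) _ _ hkn]
    apply List.map_congr_left
    intro j hj
    by_cases hjk : j = k + 1
    · subst hjk
      rw [if_pos rfl, if_pos le_rfl, cntR_succ]
    · rw [if_neg hjk]
      by_cases hjle : j ≤ k
      · rw [if_pos hjle, if_pos (by omega)]
      · rw [if_neg hjle, if_neg (by omega)]

-- ===== VERDICT (by name: the statement is the Claim_ definition above) =====
theorem solve_spec : Claim_equal_solve := by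
  intro s mj Mj _
  unfold Spec_solve
  rcases hc : s.toList with _ | ⟨ch, rest⟩
  · -- empty string: both sides are False
    simp only [solve, solve_alt]
    rw [hc]
    simp [PySem.List.enumerate_nil, aLoop, aFin]
  · have hn : 1 ≤ s.toList.length := by rw [hc]; simp
    have hA : solve s mj Mj = reach s.toList mj Mj (s.toList.length - 1) := by
      simp only [solve]
      have hdrop1 : (PySem.List.enumerate s.toList 0).drop 1
          = PySem.List.enumerate (s.toList.drop 1) ((0 : Int) + 1) := by
        rw [hc, PySem.List.enumerate_cons]
        rfl
      rw [hdrop1]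
      have hstk0 : [(0 : Int)] = stkS s.toList mj Mj (min 0 (1 - Mj)) 0 := by
        unfold stkS
        rw [show List.range 1 = [0] from rfl,
          List.filter_cons_of_pos (by simp [reach_zero]), List.filter_nil]
        simp
      rw [hstk0, show ((0 : Int) + 1) = ((0 : Nat) : Int) + 1 by norm_num]
      exact aMain s.toList mj Mj (s.toList.drop 1) 0 (min 0 (1 - Mj)) rfl (by omega)
        (by omega) (by omega)
    have hB : solve_alt s mj Mj = reach s.toList mj Mj (s.toList.length - 1) := by
      simp only [solve_alt]
      rw [if_neg (by omega)]
      rw [bMain s.toList mj Mj hn (s.toList.length - 1) le_rfl]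
      unfold dpS
      rw [getD_map_range' s.toList.length (s.toList.length - 1) _ false (by omega)]
      simp
    rw [hA, hB]
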